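-- pv_equiv track=rewrite | github.com/aren13/m365ctl | src/m365ctl/mail/cli/categorize.py | _resolve_final_categories
-- ===== SOURCE A (Python) =====
-- def _resolve_final_categories(current: list[str], add: list[str], remove: list[str], set_: list[str]) -> list[str]:
--     if set_:
--         return list(set_)
--     out = list(current)
--     for c in add:
--         if c not in out:
--             out.append(c)
--     for c in remove:
--         if c in out:
--             out.remove(c)
--     return out
-- ===== SOURCE B (Python) =====
-- def _resolve_final_categories(current: list[str], add: list[str], remove: list[str], set_: list[str]) -> list[str]:
--     if set_:
--         return list(set_)
--     out = list(current)
--     seen = set(current)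
--     for c in add:
--         if c not in seen:
--             out.append(c)
--             seen.add(c)
--     rem = {}
--     for c in remove:
--         rem[c] = rem.get(c, 0) + 1
--     result = []
--     for c in out:
--         if rem.get(c, 0) > 0:
--             rem[c] = rem[c] - 1
--         else:
--             result.append(c)
--     return result
-- ===== Notes on version B (the rewrite author's own statement) =====
-- stated objective: faster
-- what changed: The add phase tracks membership in a set instead of rescanning out, and the remove phase builds a count dict of the removals once and does a single counted forward pass over out (skip an element while its remaining count is positive) instead of one leftmost out.remove scan per removal.
import Mathlib
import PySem

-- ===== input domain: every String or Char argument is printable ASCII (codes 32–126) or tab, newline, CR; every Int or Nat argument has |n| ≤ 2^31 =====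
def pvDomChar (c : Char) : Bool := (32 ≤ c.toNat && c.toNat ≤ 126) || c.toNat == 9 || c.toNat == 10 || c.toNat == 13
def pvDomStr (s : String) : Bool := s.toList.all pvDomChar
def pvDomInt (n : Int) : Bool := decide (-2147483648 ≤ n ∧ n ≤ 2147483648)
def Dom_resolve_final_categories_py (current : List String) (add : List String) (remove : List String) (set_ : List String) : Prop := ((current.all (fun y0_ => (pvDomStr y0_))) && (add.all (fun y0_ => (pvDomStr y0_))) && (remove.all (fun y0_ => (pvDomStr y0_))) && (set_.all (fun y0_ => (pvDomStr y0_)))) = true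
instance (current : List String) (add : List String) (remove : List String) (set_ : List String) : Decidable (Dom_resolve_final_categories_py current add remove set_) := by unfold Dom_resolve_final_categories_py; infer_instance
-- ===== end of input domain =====

-- B replaces A's quadratic `c not in out` / `out.remove(c)` scans by a `seen` set for the add
-- phase and a single counted pass over `out` driven by a count dict for the remove phase (faster).

-- ===== PORT A =====
def resolve_final_categories_py (current : List String) (add : List String) (remove : List String) (set_ : List String) : List String :=
  if set_ ≠ [] then set_
  else
    let out := add.foldl (fun out c => if out.contains c then out else out ++ [c]) current
    remove.foldl (fun out c => if out.contains c then (PySem.List.remove? out c).getD out else out) out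

-- ===== PORT B =====
def resolve_final_categories_py_alt (current : List String) (add : List String) (remove : List String) (set_ : List String) : List String :=
  if set_ ≠ [] then set_
  else
    -- add phase: append unseen, tracking membership in a set
    let p := add.foldl (fun (p : List String × PySem.Set String) c =>
        if p.2.contains c then p else (p.1 ++ [c], PySem.Set.add p.2 c)) (current, PySem.Set.ofList current)
    -- count the removals once
    let rem := remove.foldl (fun (d : PySem.Dict String Int) c => d.modify c 0 (· + 1)) PySem.Dict.empty
    -- single counted pass: skip an element while its remove-count is positive
    let q := p.1.foldl (fun (q : List String × PySem.Dict String Int) c =>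
        if q.2.getD c 0 > 0 then (q.1, q.2.insert c (q.2.getD c 0 - 1)) else (q.1 ++ [c], q.2)) ([], rem)
    q.1

-- ===== PRECONDITION & SPEC =====
def Spec_resolve_final_categories_py (current : List String) (add : List String) (remove : List String) (set_ : List String) (out : List String) : Prop := out = resolve_final_categories_py_alt current add remove set_
instance (current : List String) (add : List String) (remove : List String) (set_ : List String) (out : List String) : Decidable (Spec_resolve_final_categories_py current add remove set_ out) := by unfold Spec_resolve_final_categories_py; infer_instance

-- ===== CLAIM (what is proved, stated in full; the proofs are below) =====
def Claim_equal_resolve_final_categories_py : Prop := ∀ (current : List String) (add : List String) (remove : List String) (set_ : List String), Dom_resolve_final_categories_py current add remove set_ → Spec_resolve_final_categories_py current add remove set_ (resolve_final_categories_py current add remove set_)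

-- ===== LEMMAS AND PROOFS =====

-- remove the first occurrence of c (structural form of A's `out.remove(c)` step)
def rmF : List String → String → List String
  | [], _ => []
  | a :: xs, c => if a = c then xs else a :: rmF xs c

-- skip, for each value x, the first k x occurrences of x (the common specification)
def skipK : List String → (String → Nat) → List String
  | [], _ => []
  | a :: xs, k => if k a = 0 then a :: skipK xs k else skipK xs (fun x => if x = a then k a - 1 else k x)

theorem skipK_congr (o : List String) (k k' : String → Nat) (h : ∀ x, k x = k' x) :
    skipK o k = skipK o k' := by
  have : k = k' := funext h
  rw [this]

theorem skipK_zero (o : List String) (k : String → Nat) (h : ∀ x, k x = 0) :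
    skipK o k = o := by
  induction o with
  | nil => rfl
  | cons a xs ih => simp [skipK, h a, ih]

theorem stepA_eq_rmF (o : List String) (c : String) :
    (if o.contains c then (PySem.List.remove? o c).getD o else o) = rmF o c := by
  induction o with
  | nil => simp [rmF]
  | cons a xs ih =>
    by_cases hac : a = c
    · subst hac
      simp [rmF, PySem.List.remove?_cons_self]
    · have hca : (c == a) = false := by simp [Ne.symm hac]
      simp only [rmF, if_neg hac, List.contains_cons, hca, Bool.false_or,
        PySem.List.remove?_cons_of_ne xs hac]
      by_cases hm : xs.contains c
      · have hsome : PySem.List.remove? xs c = some (xs.erase c) :=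
          PySem.List.remove?_eq_some_erase xs c (by simpa using hm)
        have h2 : xs.erase c = rmF xs c := by rw [if_pos hm, hsome] at ih; simpa using ih
        have hmem : c ∈ xs := by simpa using hm
        simp [hsome, hmem, h2]
      · have hnone : PySem.List.remove? xs c = none :=
          (PySem.List.remove?_eq_none_iff xs c).mpr (by simpa using hm)
        rw [if_neg hm] at ih
        simp [hnone, ← ih]

theorem skipK_rmF (o : List String) (k : String → Nat) (c : String) :
    skipK (rmF o c) k = skipK o (fun x => if x = c then k c + 1 else k x) := by
  induction o generalizing k with
  | nil => rfl
  | cons a xs ih =>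
    by_cases hac : a = c
    · subst hac
      have h1 : rmF (a :: xs) a = xs := by simp [rmF]
      rw [h1, skipK, if_neg (by simp)]
      exact (skipK_congr _ _ _ (fun x => by by_cases hx : x = a <;> simp [hx])).symm
    · have h1 : rmF (a :: xs) c = a :: rmF xs c := by simp [rmF, hac]
      rw [h1]
      by_cases hk : k a = 0
      · rw [skipK, if_pos hk, skipK, if_pos (by simp [hac, hk]), ih]
      · rw [skipK, if_neg hk, skipK, if_neg (by simp [hac, hk]), ih]
        exact skipK_congr _ _ _ (fun x => by
          by_cases hx : x = c <;> by_cases hy : x = a <;> simp_all)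

theorem removeFold_eq_skipK (rs o : List String) :
    rs.foldl (fun out c => if out.contains c then (PySem.List.remove? out c).getD out else out) o
      = skipK o (fun x => rs.count x) := by
  induction rs generalizing o with
  | nil => exact (skipK_zero o _ (by simp)).symm
  | cons c rs ih =>
    rw [List.foldl_cons, stepA_eq_rmF, ih, skipK_rmF]
    apply skipK_congr
    intro x
    by_cases hx : x = c
    · simp [hx]
    · simp [hx, Ne.symm hx]

theorem passB_eq_skipK (o : List String) (acc : List String) (d : PySem.Dict String Int) :
    (o.foldl (fun (q : List String × PySem.Dict String Int) c =>
        if q.2.getD c 0 > 0 then (q.1, q.2.insert c (q.2.getD c 0 - 1)) else (q.1 ++ [c], q.2)) (acc, d)).1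
      = acc ++ skipK o (fun x => (d.getD x 0).toNat) := by
  induction o generalizing acc d with
  | nil => simp [skipK]
  | cons c xs ih =>
    by_cases hv : d.getD c 0 > 0
    · simp only [List.foldl_cons, if_pos hv, ih]
      have hk : ((d.getD c 0).toNat ≠ 0) := by omega
      rw [skipK, if_neg hk]
      congr 1
      apply skipK_congr
      intro x
      rw [PySem.Dict.getD_insert]
      by_cases hx : x = c <;> simp [hx]
    · simp only [List.foldl_cons, if_neg hv, ih]
      have hk : (d.getD c 0).toNat = 0 := by omega
      rw [skipK, if_pos hk]
      simp

theorem addFold_eq (ad : List String) (out : List String) (s : PySem.Set String)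
    (h : ∀ x, s.contains x = out.contains x) :
    (ad.foldl (fun (p : List String × PySem.Set String) c =>
        if p.2.contains c then p else (p.1 ++ [c], PySem.Set.add p.2 c)) (out, s)).1
      = ad.foldl (fun out c => if out.contains c then out else out ++ [c]) out := by
  induction ad generalizing out s with
  | nil => rfl
  | cons c ad ih =>
    simp only [List.foldl_cons, h c]
    by_cases hc : out.contains c
    · rw [if_pos hc, if_pos hc]
      exact ih out s h
    · rw [if_neg hc, if_neg hc]
      apply ih
      intro x
      have hcnot : c ∉ s := fun hmem =>
        hc (by rw [← h c]; exact (PySem.Set.contains_iff s c).mpr hmem)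
      rw [PySem.Set.add_of_not_mem hcnot]
      have h' : (decide (x ∈ s) : Bool) = decide (x ∈ out) := by
        have := h x
        simp only [PySem.Set.contains_eq_listContains] at this
        simpa using this
      simp only [PySem.Set.contains_eq_listContains]
      simp [h']

theorem contains_ofList (l : List String) (x : String) :
    (PySem.Set.ofList l).contains x = l.contains x := by
  by_cases h : x ∈ l
  · have h1 : x ∈ PySem.Set.ofList l := (PySem.Set.mem_ofList l x).mpr h
    simp_all
  · have h1 : x ∉ PySem.Set.ofList l := fun hb => h ((PySem.Set.mem_ofList l x).mp hb)
    simp_all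

-- ===== VERDICT (by name: the statement is the Claim_ definition above) =====
theorem resolve_final_categories_py_spec : Claim_equal_resolve_final_categories_py := by
  intro current add remove set_ _
  unfold Spec_resolve_final_categories_py resolve_final_categories_py resolve_final_categories_py_alt
  by_cases hs : set_ ≠ []
  · rw [if_pos hs, if_pos hs]
  · rw [if_neg hs, if_neg hs]
    simp only
    rw [addFold_eq add current (PySem.Set.ofList current) (contains_ofList current),
        passB_eq_skipK, removeFold_eq_skipK]
    simp only [List.nil_append]
    apply skipK_congr
    intro x
    rw [PySem.Dict.getD_foldl_modify_add_one]
    simp
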